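-- pv_equiv track=rewrite | github.com/markvwald2/shirtclawd | bot/follow_up.py | find_publish_record
-- ===== SOURCE A (Python) =====
-- def find_publish_record(post, entry, publish_records):
--     platform = entry.get("platform") or post.get("platform")
--     shirt_id = entry.get("shirt_id") or post.get("shirt_id")
--     title = entry.get("title") or post.get("title")
--     for record in reversed(publish_records):
--         if record.get("platform") != platform:
--             continue
--         if shirt_id and record.get("shirt_id") == shirt_id:
--             return record
--         if title and record.get("title") == title:
--             return record
--     return None
-- ===== SOURCE B (Python) =====
-- def find_publish_record(post, entry, publish_records):
--     platform = entry.get("platform") or post.get("platform")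
--     shirt_id = entry.get("shirt_id") or post.get("shirt_id")
--     title = entry.get("title") or post.get("title")
--     # Build hash indexes over the platform-matching records: field value -> (position, record),
--     # later entries overwriting earlier ones, then answer by at most two O(1) lookups.
--     by_shirt = {}
--     by_title = {}
--     for i, record in enumerate(publish_records):
--         if record.get("platform") != platform:
--             continue
--         by_shirt[record.get("shirt_id")] = (i, record)
--         by_title[record.get("title")] = (i, record)
--     best = None
--     if shirt_id and shirt_id in by_shirt:
--         best = by_shirt[shirt_id]
--     if title and title in by_title:
--         cand = by_title[title]
--         if best is None or cand[0] > best[0]: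
--             best = cand
--     return None if best is None else best[1]
-- ===== Notes on version B (the rewrite author's own statement) =====
-- stated objective: alternative
-- what changed: Replaces the reversed linear scan with a hash-index algorithm: one pass builds two dicts mapping shirt_id/title values of platform-matching records to (position, record) with later records overwriting earlier ones, then the answer is chosen by at most two O(1) lookups taking the candidate with the larger position.
import Mathlib
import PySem

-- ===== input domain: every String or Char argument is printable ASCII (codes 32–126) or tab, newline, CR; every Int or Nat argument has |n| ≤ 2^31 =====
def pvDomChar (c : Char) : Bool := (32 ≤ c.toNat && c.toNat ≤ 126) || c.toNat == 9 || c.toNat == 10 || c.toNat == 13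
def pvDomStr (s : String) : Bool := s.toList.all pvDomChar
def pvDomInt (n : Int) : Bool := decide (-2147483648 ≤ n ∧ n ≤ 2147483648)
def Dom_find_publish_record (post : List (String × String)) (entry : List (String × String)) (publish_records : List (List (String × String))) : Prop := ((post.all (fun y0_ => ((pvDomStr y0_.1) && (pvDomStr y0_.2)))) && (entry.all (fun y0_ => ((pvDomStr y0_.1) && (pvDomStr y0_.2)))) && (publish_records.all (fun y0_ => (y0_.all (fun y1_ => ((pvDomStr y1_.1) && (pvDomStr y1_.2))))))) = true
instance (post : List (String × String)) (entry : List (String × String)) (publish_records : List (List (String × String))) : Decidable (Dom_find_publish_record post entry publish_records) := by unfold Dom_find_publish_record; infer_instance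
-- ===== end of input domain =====

-- B replaces A's reversed linear scan by a hash-index algorithm (build two dicts once, answer by two lookups); alternative structure, same value.

-- shared Python-semantics helpers: dict.get, truthiness of an Optional[str], and `x or y`
def pvGet (d : List (String × String)) (k : String) : Option String := (PySem.Dict.mk d).get? k
def pvTruthy : Option String → Bool
  | none => false
  | some s => !(s == "")
def pvOrElse (a b : Option String) : Option String := if pvTruthy a then a else b

-- ===== PORT A =====
-- A's loop over reversed(publish_records): continue on platform mismatch, return on either match
def findA_loop (platform shirt_id title : Option String) : List (List (String × String)) → Option (List (String × String))
  | [] => none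
  | r :: rest =>
    if pvGet r "platform" != platform then findA_loop platform shirt_id title rest
    else if pvTruthy shirt_id && (pvGet r "shirt_id" == shirt_id) then some r
    else if pvTruthy title && (pvGet r "title" == title) then some r
    else findA_loop platform shirt_id title rest

def find_publish_record (post : List (String × String)) (entry : List (String × String)) (publish_records : List (List (String × String))) : Option (List (String × String)) :=
  let platform := pvOrElse (pvGet entry "platform") (pvGet post "platform")
  let shirt_id := pvOrElse (pvGet entry "shirt_id") (pvGet post "shirt_id")
  let title := pvOrElse (pvGet entry "title") (pvGet post "title")
  findA_loop platform shirt_id title publish_records.reverse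

-- ===== PORT B =====
-- the state of B's index-building loop: (by_shirt, by_title)
def pvIdxState := PySem.Dict (Option String) (Int × List (String × String)) × PySem.Dict (Option String) (Int × List (String × String))

-- one iteration of B's `for i, record in enumerate(...)` loop (continue on platform mismatch, else index by shirt_id and title)
def stepB (platform : Option String) (st : pvIdxState) (p : Int × List (String × String)) : pvIdxState :=
  if pvGet p.2 "platform" != platform then st
  else (st.1.insert (pvGet p.2 "shirt_id") p, st.2.insert (pvGet p.2 "title") p)

def find_publish_record_alt (post : List (String × String)) (entry : List (String × String)) (publish_records : List (List (String × String))) : Option (List (String × String)) :=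
  let platform := pvOrElse (pvGet entry "platform") (pvGet post "platform")
  let shirt_id := pvOrElse (pvGet entry "shirt_id") (pvGet post "shirt_id")
  let title := pvOrElse (pvGet entry "title") (pvGet post "title")
  let idx := (PySem.List.enumerate publish_records).foldl (stepB platform) (PySem.Dict.empty, PySem.Dict.empty)
  -- if shirt_id and shirt_id in by_shirt: best = by_shirt[shirt_id]
  let best1 : Option (Int × List (String × String)) :=
    if pvTruthy shirt_id then idx.1.get? shirt_id else none
  -- if title and title in by_title: take cand if best is None or cand[0] > best[0]
  let best2 : Option (Int × List (String × String)) :=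
    if pvTruthy title then
      match idx.2.get? title with
      | some cand =>
        match best1 with
        | none => some cand
        | some b => if cand.1 > b.1 then some cand else some b
      | none => best1
    else best1
  best2.map (·.2)

-- ===== PRECONDITION & SPEC =====
def Spec_find_publish_record (post : List (String × String)) (entry : List (String × String)) (publish_records : List (List (String × String))) (out : Option (List (String × String))) : Prop := out = find_publish_record_alt post entry publish_records
instance (post : List (String × String)) (entry : List (String × String)) (publish_records : List (List (String × String))) (out : Option (List (String × String))) : Decidable (Spec_find_publish_record post entry publish_records out) := by unfold Spec_find_publish_record; infer_instance

-- ===== CLAIM (what is proved, stated in full; the proofs are below) =====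
def Claim_equal_find_publish_record : Prop := ∀ (post : List (String × String)) (entry : List (String × String)) (publish_records : List (List (String × String))), Dom_find_publish_record post entry publish_records → Spec_find_publish_record post entry publish_records (find_publish_record post entry publish_records)

-- ===== LEMMAS AND PROOFS =====

-- B's combined match condition for a single record (proof-only abbreviation)
def matchB (platform shirt_id title : Option String) (r : List (String × String)) : Bool :=
  (pvGet r "platform" == platform) &&
    ((pvTruthy shirt_id && (pvGet r "shirt_id" == shirt_id)) ||
     (pvTruthy title && (pvGet r "title" == title)))

-- A's branch structure is find? with the combined predicate
theorem findA_loop_eq_find? (p s t : Option String) (l : List (List (String × String))) :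
    findA_loop p s t l = l.find? (matchB p s t) := by
  induction l with
  | nil => rfl
  | cons r rest ih =>
    simp only [findA_loop, List.find?, matchB, bne]
    by_cases h1 : pvGet r "platform" == p
    · simp only [h1, Bool.not_true, Bool.true_and]
      by_cases h2 : pvTruthy s && (pvGet r "shirt_id" == s)
      · simp [h2]
      · by_cases h3 : pvTruthy t && (pvGet r "title" == t) <;> simp [h2, h3, ih]
    · simp only [Bool.not_eq_true] at h1
      simp [h1, ih]

-- the shirt index built by the fold answers "last platform-matching pair whose shirt_id field is k"
theorem fold_fst_get? (platform k : Option String) (qs : List (Int × List (String × String))) (st : pvIdxState) :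
    (qs.foldl (stepB platform) st).1.get? k =
      match qs.reverse.find? (fun x => (pvGet x.2 "platform" == platform) && (pvGet x.2 "shirt_id" == k)) with
      | some x => some x
      | none => st.1.get? k := by
  induction qs using List.reverseRecOn generalizing st with
  | nil => rfl
  | append_singleton qs x ih =>
    rw [List.foldl_append, List.foldl_cons, List.foldl_nil, List.reverse_append]
    simp only [List.reverse_cons, List.reverse_nil, List.nil_append, List.singleton_append,
      List.find?]
    by_cases hp : pvGet x.2 "platform" == platform
    · have hstep : stepB platform (qs.foldl (stepB platform) st) x =
          ((qs.foldl (stepB platform) st).1.insert (pvGet x.2 "shirt_id") x,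
           (qs.foldl (stepB platform) st).2.insert (pvGet x.2 "title") x) := by
        simp [stepB, beq_iff_eq.mp hp]
      rw [hstep]
      by_cases hk : pvGet x.2 "shirt_id" == k
      · have hke : k = pvGet x.2 "shirt_id" := (beq_iff_eq.mp hk).symm
        simp [hp, hke, PySem.Dict.get?_insert_self]
      · have hne : k ≠ pvGet x.2 "shirt_id" := fun h => hk (by simp [h])
        simp only [hp, hk, Bool.and_false]
        rw [PySem.Dict.get?_insert_of_ne _ _ hne, ih]
    · have hstep : stepB platform (qs.foldl (stepB platform) st) x =
          qs.foldl (stepB platform) st := by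
        have hpe : pvGet x.2 "platform" ≠ platform := fun h => hp (by simp [h])
        simp [stepB, hpe]
      rw [hstep, ih]
      simp [hp]

-- the title index likewise
theorem fold_snd_get? (platform k : Option String) (qs : List (Int × List (String × String))) (st : pvIdxState) :
    (qs.foldl (stepB platform) st).2.get? k =
      match qs.reverse.find? (fun x => (pvGet x.2 "platform" == platform) && (pvGet x.2 "title" == k)) with
      | some x => some x
      | none => st.2.get? k := by
  induction qs using List.reverseRecOn generalizing st with
  | nil => rfl
  | append_singleton qs x ih =>
    rw [List.foldl_append, List.foldl_cons, List.foldl_nil, List.reverse_append]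
    simp only [List.reverse_cons, List.reverse_nil, List.nil_append, List.singleton_append,
      List.find?]
    by_cases hp : pvGet x.2 "platform" == platform
    · have hstep : stepB platform (qs.foldl (stepB platform) st) x =
          ((qs.foldl (stepB platform) st).1.insert (pvGet x.2 "shirt_id") x,
           (qs.foldl (stepB platform) st).2.insert (pvGet x.2 "title") x) := by
        simp [stepB, beq_iff_eq.mp hp]
      rw [hstep]
      by_cases hk : pvGet x.2 "title" == k
      · have hke : k = pvGet x.2 "title" := (beq_iff_eq.mp hk).symm
        simp [hp, hke, PySem.Dict.get?_insert_self]
      · have hne : k ≠ pvGet x.2 "title" := fun h => hk (by simp [h])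
        simp only [hp, hk, Bool.and_false]
        rw [PySem.Dict.get?_insert_of_ne _ _ hne, ih]
    · have hstep : stepB platform (qs.foldl (stepB platform) st) x =
          qs.foldl (stepB platform) st := by
        have hpe : pvGet x.2 "platform" ≠ platform := fun h => hp (by simp [h])
        simp [stepB, hpe]
      rw [hstep, ih]
      simp [hp]

-- on a list with strictly decreasing first components, the first match of a disjunction is
-- whichever of the two single-predicate first matches carries the larger first component
theorem find?_or_combine {R : Type} (pS pT : Int × R → Bool) (ps : List (Int × R))
    (hsort : ps.Pairwise (fun x y => y.1 < x.1)) :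
    ps.find? (fun x => pS x || pT x) =
      match ps.find? pT with
      | none => ps.find? pS
      | some c =>
        match ps.find? pS with
        | none => some c
        | some b => if c.1 > b.1 then some c else some b := by
  induction ps with
  | nil => rfl
  | cons h t ih =>
    rcases List.pairwise_cons.mp hsort with ⟨hlt, htail⟩
    by_cases hS : pS h
    · by_cases hT : pT h
      · simp [List.find?, hS, hT]
      · simp only [List.find?, hS, hT, Bool.true_or]
        cases hfT : t.find? pT with
        | none => simp
        | some c =>
          have hc := hlt _ (List.mem_of_find?_eq_some hfT)
          simp [not_lt_of_gt hc]
    · by_cases hT : pT h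
      · simp only [List.find?, hS, hT, Bool.false_or]
        cases hfS : t.find? pS with
        | none => simp
        | some b =>
          have hb := hlt _ (List.mem_of_find?_eq_some hfS)
          simp [hb]
      · simp only [List.find?, hS, hT, Bool.false_or]
        exact ih htail

-- the whole computation, with the three looked-up fields abstracted
theorem mainEq (p s t : Option String) (l : List (List (String × String))) :
    findA_loop p s t l.reverse =
      (let idx := (PySem.List.enumerate l).foldl (stepB p) (PySem.Dict.empty, PySem.Dict.empty)
       let best1 : Option (Int × List (String × String)) :=
         if pvTruthy s then idx.1.get? s else none
       let best2 : Option (Int × List (String × String)) :=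
         if pvTruthy t then
           match idx.2.get? t with
           | some cand =>
             match best1 with
             | none => some cand
             | some b => if cand.1 > b.1 then some cand else some b
           | none => best1
         else best1
       best2.map (·.2)) := by
  rw [findA_loop_eq_find?]
  have hps : l.reverse = (PySem.List.enumerate l).reverse.map (·.2) := by
    rw [List.map_reverse, PySem.List.map_snd_enumerate]
  rw [hps, List.find?_map]
  have hsort : (PySem.List.enumerate l).reverse.Pairwise
      (fun x y : Int × List (String × String) => y.1 < x.1) := by
    rw [List.pairwise_reverse]
    exact PySem.List.pairwise_lt_enumerate l 0
  simp only [fold_fst_get?, fold_snd_get?]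
  set ps := (PySem.List.enumerate l).reverse with hps'
  by_cases hts : pvTruthy s <;> by_cases htt : pvTruthy t
  · -- both truthy: the disjunction splits into the two indexed predicates
    have hpred : (matchB p s t ∘ fun x : Int × List (String × String) => x.2) =
        (fun x => ((pvGet x.2 "platform" == p) && (pvGet x.2 "shirt_id" == s)) ||
                  ((pvGet x.2 "platform" == p) && (pvGet x.2 "title" == t))) := by
      funext x
      simp [Function.comp, matchB, hts, htt, Bool.and_or_distrib_left]
    rw [hpred, find?_or_combine _ _ _ hsort]
    simp only [hts, htt]
    cases ps.find? (fun x => (pvGet x.2 "platform" == p) && (pvGet x.2 "title" == t)) <;>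
      cases ps.find? (fun x => (pvGet x.2 "platform" == p) && (pvGet x.2 "shirt_id" == s)) <;>
      simp [PySem.Dict.get?_empty]
  · -- only shirt_id truthy
    have hpred : (matchB p s t ∘ fun x : Int × List (String × String) => x.2) =
        (fun x => (pvGet x.2 "platform" == p) && (pvGet x.2 "shirt_id" == s)) := by
      funext x; simp [Function.comp, matchB, hts, htt]
    rw [hpred]
    simp only [hts, htt]
    cases ps.find? (fun x => (pvGet x.2 "platform" == p) && (pvGet x.2 "shirt_id" == s)) <;>
      simp [PySem.Dict.get?_empty]
  · -- only title truthy
    have hpred : (matchB p s t ∘ fun x : Int × List (String × String) => x.2) =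
        (fun x => (pvGet x.2 "platform" == p) && (pvGet x.2 "title" == t)) := by
      funext x; simp [Function.comp, matchB, hts, htt]
    rw [hpred]
    simp only [hts, htt]
    cases ps.find? (fun x => (pvGet x.2 "platform" == p) && (pvGet x.2 "title" == t)) <;>
      simp [PySem.Dict.get?_empty]
  · -- neither truthy: no record can match
    have hpred : ps.find? (matchB p s t ∘ fun x : Int × List (String × String) => x.2) = none := by
      apply List.find?_eq_none.mpr
      intro x _
      simp [Function.comp, matchB, hts, htt]
    rw [hpred]
    simp [hts, htt]

-- ===== VERDICT (by name: the statement is the Claim_ definition above) =====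
theorem find_publish_record_spec : Claim_equal_find_publish_record := by
  intro post entry publish_records _
  exact mainEq _ _ _ _
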